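-- pv_equiv track=rewrite | github.com/Davie7/assignment_lux | closest_key.py | closest_key
-- ===== SOURCE A (Python) =====
-- def closest_key(dictionary, target_value):
--     min_index = float('inf')
--     closest_key = None
--
--     for key, value_list in dictionary.items():
--         if target_value in value_list:
--             current_index = value_list.index(target_value)
--             if current_index < min_index:
--                 min_index = current_index
--                 closest_key = key
--
--     return closest_key
-- ===== SOURCE B (Python) =====
-- def closest_key(dictionary, target_value):
--     items = list(dictionary.items())
--     max_len = max((len(vs) for _, vs in items), default=0)
--     for p in range(max_len):
--         for key, vs in items:
--             if p < len(vs) and vs[p] == target_value: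
--                 return key
--     return None
-- ===== Notes on version B (the rewrite author's own statement) =====
-- stated objective: alternative
-- what changed: B searches candidate positions p = 0,1,2,... outward and returns the first key (in dict order) whose value list has target_value exactly at position p, instead of A's single pass that tracks the minimal first-index per key with a strict-< accumulator.
import Mathlib
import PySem

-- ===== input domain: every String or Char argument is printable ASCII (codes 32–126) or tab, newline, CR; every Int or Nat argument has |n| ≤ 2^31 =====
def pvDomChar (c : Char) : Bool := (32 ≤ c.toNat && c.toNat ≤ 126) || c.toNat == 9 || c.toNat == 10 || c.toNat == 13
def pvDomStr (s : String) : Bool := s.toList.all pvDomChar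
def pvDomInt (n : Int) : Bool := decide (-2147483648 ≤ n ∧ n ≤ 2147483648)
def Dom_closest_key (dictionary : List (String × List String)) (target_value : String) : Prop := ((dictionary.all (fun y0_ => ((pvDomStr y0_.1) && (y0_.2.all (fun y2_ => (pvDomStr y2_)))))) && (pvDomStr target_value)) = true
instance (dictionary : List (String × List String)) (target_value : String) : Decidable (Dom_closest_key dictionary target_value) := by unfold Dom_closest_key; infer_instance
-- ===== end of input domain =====

-- B searches candidate positions p = 0,1,... outward, returning the first key holding target_value
-- at position p, instead of A's single pass tracking the minimal first-index with a strict-< update.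

-- ===== PORT A =====
-- 'current_index < min_index' with min_index starting at float('inf'): none plays inf
def pvLtInf (i : Nat) : Option Nat → Bool
  | none => true
  | some m => i < m

def closest_key (dictionary : List (String × List String)) (target_value : String) : Option String :=
  (dictionary.foldl (fun (st : Option Nat × Option String) kv =>
    if target_value ∈ kv.2 then
      match PySem.List.index? kv.2 target_value with
      | some ci => if pvLtInf ci st.1 then (some ci, some kv.1) else st
      | none => st   -- unreachable: membership was just checked
    else st) (none, none)).2

-- ===== PORT B =====
def pvFindAt (d : List (String × List String)) (t : String) (p : Nat) : Option String :=
  match d with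
  | [] => none
  | kv :: rest => if kv.2[p]? = some t then some kv.1 else pvFindAt rest t p

def pvScanPos (d : List (String × List String)) (t : String) (p : Nat) : Nat → Option String
  | 0 => none
  | fuel + 1 =>
    match pvFindAt d t p with
    | some k => some k
    | none => pvScanPos d t (p + 1) fuel

def closest_key_alt (dictionary : List (String × List String)) (target_value : String) : Option String :=
  pvScanPos dictionary target_value 0 (dictionary.foldl (fun m kv => max m kv.2.length) 0)

-- ===== PRECONDITION & SPEC =====
def Spec_closest_key (dictionary : List (String × List String)) (target_value : String) (out : Option String) : Prop := out = closest_key_alt dictionary target_value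
instance (dictionary : List (String × List String)) (target_value : String) (out : Option String) : Decidable (Spec_closest_key dictionary target_value out) := by unfold Spec_closest_key; infer_instance

-- ===== CLAIM (what is proved, stated in full; the proofs are below) =====
def Claim_equal_closest_key : Prop := ∀ (dictionary : List (String × List String)) (target_value : String), Dom_closest_key dictionary target_value → Spec_closest_key dictionary target_value (closest_key dictionary target_value)

-- ===== LEMMAS AND PROOFS =====

-- Reference: first entry achieving the minimal first-index of t (head wins ties against the rest).
def bestSpec (t : String) : List (String × List String) → Option (Nat × String)
  | [] => none
  | kv :: rest =>
    match PySem.List.index? kv.2 t with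
    | none => bestSpec t rest
    | some i =>
      match bestSpec t rest with
      | none => some (i, kv.1)
      | some (j, k') => if i ≤ j then some (i, kv.1) else some (j, k')

lemma idx_le_of_getElem (vs : List String) (t : String) (p : Nat) (hp : vs[p]? = some t) :
    ∀ k, PySem.List.index? vs t = some k → k ≤ p := by
  intro k hk
  obtain ⟨hkl, hget, hmin⟩ := PySem.List.getElem_of_index?_eq_some hk
  by_contra hgt
  have hgt' : p < k := by omega
  have hpl : p < vs.length := (List.getElem?_eq_some_iff.mp hp).1
  have : vs[p] = t := by
    have := List.getElem?_eq_getElem hpl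
    rw [hp] at this; exact (Option.some.injEq _ _).mp this.symm
  exact hmin p hgt' this

lemma mem_of_getElem (vs : List String) (t : String) (p : Nat) (hp : vs[p]? = some t) :
    t ∈ vs := by
  obtain ⟨h1, h2⟩ := List.getElem?_eq_some_iff.mp hp
  exact h2 ▸ List.getElem_mem h1

-- ---- A-side ----

lemma foldA_eq (t : String) (l : List (String × List String)) :
    ∀ (mi : Option Nat) (ck : Option String),
    l.foldl (fun (st : Option Nat × Option String) kv =>
      if t ∈ kv.2 then
        match PySem.List.index? kv.2 t with
        | some ci => if pvLtInf ci st.1 then (some ci, some kv.1) else st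
        | none => st
      else st) (mi, ck)
    = match bestSpec t l with
      | none => (mi, ck)
      | some (i, k) => if pvLtInf i mi then (some i, some k) else (mi, ck) := by
  induction l with
  | nil => intro mi ck; simp [bestSpec]
  | cons kv rest ih =>
    intro mi ck
    simp only [List.foldl_cons, bestSpec]
    cases h : PySem.List.index? kv.2 t with
    | none =>
      have hmem : t ∉ kv.2 := by
        have := PySem.List.index?_eq_none_iff (xs := kv.2) (v := t)
        rw [h] at this; exact this.mp rfl
      simp only [if_neg hmem]
      exact ih mi ck
    | some i =>
      have hmem : t ∈ kv.2 := by
        have := PySem.List.index?_isSome_iff (xs := kv.2) (v := t)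
        rw [h] at this; exact this.mp rfl
      simp only [if_pos hmem]
      by_cases hlt : pvLtInf i mi = true
      · rw [if_pos hlt, ih]
        cases hb : bestSpec t rest with
        | none => simp [hlt]
        | some pr =>
          obtain ⟨j, k'⟩ := pr
          by_cases hij : i ≤ j
          · have hnj : ¬ pvLtInf j (some i) = true := by simp [pvLtInf]; omega
            simp [hij, hnj, hlt]
          · have hji : pvLtInf j (some i) = true := by simp [pvLtInf]; omega
            have hjm : pvLtInf j mi = true := by
              cases mi
              · simp [pvLtInf]
              · simp [pvLtInf] at hlt hji ⊢; omega
            simp [hij, hji, hjm]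
      · rw [if_neg hlt, ih]
        obtain ⟨m, rfl⟩ : ∃ m, mi = some m := by
          cases mi
          · simp [pvLtInf] at hlt
          · exact ⟨_, rfl⟩
        have him : m ≤ i := by simp [pvLtInf] at hlt; omega
        cases hb : bestSpec t rest with
        | none => simp [pvLtInf]; omega
        | some pr =>
          obtain ⟨j, k'⟩ := pr
          by_cases hij : i ≤ j
          · have hj' : ¬ pvLtInf j (some m) = true := by simp [pvLtInf]; omega
            simp [hij, hj', hlt]
          · simp [hij]

lemma closest_key_eq_bestSpec (t : String) (d : List (String × List String)) :
    closest_key d t = (bestSpec t d).map (·.2) := by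
  unfold closest_key
  rw [foldA_eq]
  cases h : bestSpec t d with
  | none => simp
  | some pr => obtain ⟨i, k⟩ := pr; simp [pvLtInf]

-- ---- B-side ----

lemma bestSpec_none (t : String) (d : List (String × List String))
    (h : bestSpec t d = none) : ∀ kv ∈ d, PySem.List.index? kv.2 t = none := by
  induction d with
  | nil => simp
  | cons kv rest ih =>
    intro kv' hkv'
    simp only [bestSpec] at h
    cases h0 : PySem.List.index? kv.2 t with
    | none =>
      simp only [h0] at h
      rcases List.mem_cons.mp hkv' with rfl | hm
      · exact h0
      · exact ih h kv' hm
    | some i =>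
      simp only [h0] at h
      cases hb : bestSpec t rest with
      | none => simp only [hb] at h; exact absurd h (by simp)
      | some pr =>
        obtain ⟨j, k'⟩ := pr
        simp only [hb] at h
        split at h <;> exact absurd h (by simp)

lemma bestSpec_min (t : String) (d : List (String × List String)) (i : Nat) (k : String)
    (h : bestSpec t d = some (i, k)) :
    ∀ kv ∈ d, ∀ j, PySem.List.index? kv.2 t = some j → i ≤ j := by
  induction d generalizing i k with
  | nil => exact absurd h (by simp [bestSpec])
  | cons kv rest ih =>
    intro kv' hkv' j hj
    simp only [bestSpec] at h
    cases h0 : PySem.List.index? kv.2 t with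
    | none =>
      simp only [h0] at h
      rcases List.mem_cons.mp hkv' with rfl | hm
      · rw [h0] at hj; exact absurd hj (by simp)
      · exact ih _ _ h kv' hm j hj
    | some i0 =>
      simp only [h0] at h
      cases hb : bestSpec t rest with
      | none =>
        simp only [hb] at h
        have hnone := bestSpec_none t rest hb
        rcases List.mem_cons.mp hkv' with rfl | hm
        · rw [h0] at hj
          simp at h hj
          omega
        · rw [hnone kv' hm] at hj; exact absurd hj (by simp)
      | some pr =>
        obtain ⟨j0, k0⟩ := pr
        simp only [hb] at h
        by_cases hij : i0 ≤ j0
        · rw [if_pos hij] at h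
          have hi : i = i0 := by simp at h; omega
          subst hi
          rcases List.mem_cons.mp hkv' with rfl | hm
          · rw [h0] at hj; simp at hj; omega
          · have := ih _ _ hb kv' hm j hj; omega
        · rw [if_neg hij] at h
          have hi : i = j0 := by simp at h; omega
          subst hi
          rcases List.mem_cons.mp hkv' with rfl | hm
          · rw [h0] at hj; simp at hj; omega
          · exact ih _ _ hb kv' hm j hj

lemma findAt_none (t : String) (d : List (String × List String)) (p : Nat)
    (h : ∀ kv ∈ d, ∀ j, PySem.List.index? kv.2 t = some j → p < j) :
    pvFindAt d t p = none := by
  induction d with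
  | nil => rfl
  | cons kv rest ih =>
    simp only [pvFindAt]
    have hne : ¬ kv.2[p]? = some t := by
      intro hp
      have hmem := mem_of_getElem kv.2 t p hp
      obtain ⟨j, hj⟩ := Option.isSome_iff_exists.mp
        ((PySem.List.index?_isSome_iff (xs := kv.2) (v := t)).mpr hmem)
      have h1 := idx_le_of_getElem kv.2 t p hp j hj
      have h2 := h kv (List.mem_cons_self) j hj
      omega
    rw [if_neg hne]
    exact ih (fun kv' hm => h kv' (List.mem_cons_of_mem _ hm))

lemma findAt_best (t : String) (d : List (String × List String)) (i : Nat) (k : String)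
    (h : bestSpec t d = some (i, k)) : pvFindAt d t i = some k := by
  induction d generalizing i k with
  | nil => simp [bestSpec] at h
  | cons kv rest ih =>
    simp only [bestSpec] at h
    simp only [pvFindAt]
    cases h0 : PySem.List.index? kv.2 t with
    | none =>
      simp only [h0] at h
      have hne : ¬ kv.2[i]? = some t := by
        intro hp
        have hmem := mem_of_getElem kv.2 t i hp
        have := (PySem.List.index?_eq_none_iff (xs := kv.2) (v := t)).mp h0
        exact this hmem
      rw [if_neg hne]
      exact ih _ _ h
    | some i0 =>
      simp only [h0] at h
      have hget0 : kv.2[i0]? = some t := by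
        obtain ⟨hkl, hget, _⟩ := PySem.List.getElem_of_index?_eq_some h0
        rw [List.getElem?_eq_getElem hkl, hget]
      cases hb : bestSpec t rest with
      | none =>
        simp only [hb] at h
        simp at h
        obtain ⟨rfl, rfl⟩ := h
        rw [if_pos hget0]
      | some pr =>
        obtain ⟨j0, k0⟩ := pr
        simp only [hb] at h
        by_cases hij : i0 ≤ j0
        · rw [if_pos hij] at h
          simp at h
          obtain ⟨rfl, rfl⟩ := h
          rw [if_pos hget0]
        · rw [if_neg hij] at h
          simp at h
          obtain ⟨rfl, rfl⟩ := h
          have hne : ¬ kv.2[j0]? = some t := by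
            intro hp
            have := idx_le_of_getElem kv.2 t j0 hp i0 h0
            omega
          rw [if_neg hne]
          exact ih _ _ hb

lemma scan_none (t : String) (d : List (String × List String))
    (h : bestSpec t d = none) : ∀ fuel p, pvScanPos d t p fuel = none := by
  intro fuel
  induction fuel with
  | zero => intro p; rfl
  | succ f ihf =>
    intro p
    simp only [pvScanPos]
    rw [findAt_none t d p (fun kv hm j hj => by
      rw [bestSpec_none t d h kv hm] at hj; exact absurd hj (by simp))]
    exact ihf (p + 1)

lemma scan_some (t : String) (d : List (String × List String)) (i : Nat) (k : String)
    (h : bestSpec t d = some (i, k)) :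
    ∀ fuel p, p ≤ i → i < p + fuel → pvScanPos d t p fuel = some k := by
  intro fuel
  induction fuel with
  | zero => intro p h1 h2; omega
  | succ f ihf =>
    intro p h1 h2
    simp only [pvScanPos]
    rcases Nat.lt_or_ge p i with hpi | hpi
    · rw [findAt_none t d p (fun kv hm j hj => by
        have := bestSpec_min t d i k h kv hm j hj; omega)]
      exact ihf (p + 1) (by omega) (by omega)
    · have : p = i := by omega
      subst this
      rw [findAt_best t d p k h]

lemma bestSpec_bound (t : String) (d : List (String × List String)) (i : Nat) (k : String)
    (h : bestSpec t d = some (i, k)) :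
    ∃ vs, (k, vs) ∈ d ∧ i < vs.length := by
  induction d generalizing i k with
  | nil => simp [bestSpec] at h
  | cons kv rest ih =>
    simp only [bestSpec] at h
    cases h0 : PySem.List.index? kv.2 t with
    | none =>
      simp only [h0] at h
      obtain ⟨vs, hm, hl⟩ := ih _ _ h
      exact ⟨vs, List.mem_cons_of_mem _ hm, hl⟩
    | some i0 =>
      simp only [h0] at h
      have hlen : i0 < kv.2.length := (PySem.List.getElem_of_index?_eq_some h0).1
      cases hb : bestSpec t rest with
      | none =>
        simp only [hb] at h
        simp at h
        obtain ⟨rfl, rfl⟩ := h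
        exact ⟨kv.2, List.mem_cons_self, hlen⟩
      | some pr =>
        obtain ⟨j0, k0⟩ := pr
        simp only [hb] at h
        by_cases hij : i0 ≤ j0
        · rw [if_pos hij] at h; simp at h
          obtain ⟨rfl, rfl⟩ := h
          exact ⟨kv.2, List.mem_cons_self, hlen⟩
        · rw [if_neg hij] at h; simp at h
          obtain ⟨rfl, rfl⟩ := h
          obtain ⟨vs, hm, hl⟩ := ih _ _ hb
          exact ⟨vs, List.mem_cons_of_mem _ hm, hl⟩

lemma foldl_max_init (d : List (String × List String)) :
    ∀ init : Nat, init ≤ d.foldl (fun m kv => max m kv.2.length) init := by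
  induction d with
  | nil => intro init; simp
  | cons kv rest ih =>
    intro init
    simp only [List.foldl_cons]
    exact le_trans (Nat.le_max_left _ _) (ih _)

lemma maxlen_ge (d : List (String × List String)) :
    ∀ kv ∈ d, kv.2.length ≤ d.foldl (fun m kv => max m kv.2.length) 0 := by
  suffices h : ∀ init : Nat, ∀ kv ∈ d, kv.2.length ≤ d.foldl (fun m kv => max m kv.2.length) init from h 0
  induction d with
  | nil => simp
  | cons kv rest ih =>
    intro init kv' hkv'
    simp only [List.foldl_cons]
    rcases List.mem_cons.mp hkv' with rfl | hm
    · exact le_trans (Nat.le_max_right _ _) (foldl_max_init rest _)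
    · exact ih _ kv' hm

lemma alt_eq_bestSpec (t : String) (d : List (String × List String)) :
    closest_key_alt d t = (bestSpec t d).map (·.2) := by
  unfold closest_key_alt
  cases h : bestSpec t d with
  | none => simp [scan_none t d h]
  | some pr =>
    obtain ⟨i, k⟩ := pr
    obtain ⟨vs, hm, hl⟩ := bestSpec_bound t d i k h
    have hb := maxlen_ge d (k, vs) hm
    simp only [Option.map_some]
    exact scan_some t d i k h _ 0 (Nat.zero_le _) (by simp at hb ⊢; omega)

-- ===== VERDICT (by name: the statement is the Claim_ definition above) =====
theorem closest_key_spec : Claim_equal_closest_key := by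
  intro d t _
  unfold Spec_closest_key
  rw [closest_key_eq_bestSpec, alt_eq_bestSpec]
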